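-- pv_equiv track=rewrite | github.com/Bankee-256/Smart-traffic-lights | sourcecode/stats.py | IsFloat
-- ===== SOURCE A (Python) =====
-- def IsFloat(str):
--     s = str.split('.')
--     if len(s) > 2:
--         return False
--     else:
--         for si in s:
--             if not si.isnumeric():
--                 return False
--         return True
-- ===== SOURCE B (Python) =====
-- def IsFloat(str):
--     dots = 0
--     seg = 0
--     for ch in str:
--         if ch == '.':
--             if seg == 0:
--                 return False
--             dots += 1
--             seg = 0
--         elif ch.isnumeric():
--             seg += 1
--         else:
--             return False
--     return dots <= 1 and seg > 0
-- ===== Notes on version B (the rewrite author's own statement) =====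
-- stated objective: alternative
-- what changed: Replaces split-on-dot followed by per-segment isnumeric checks with a single left-to-right character scan maintaining a dot counter and the current segment length, building no intermediate list of substrings.
import Mathlib
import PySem

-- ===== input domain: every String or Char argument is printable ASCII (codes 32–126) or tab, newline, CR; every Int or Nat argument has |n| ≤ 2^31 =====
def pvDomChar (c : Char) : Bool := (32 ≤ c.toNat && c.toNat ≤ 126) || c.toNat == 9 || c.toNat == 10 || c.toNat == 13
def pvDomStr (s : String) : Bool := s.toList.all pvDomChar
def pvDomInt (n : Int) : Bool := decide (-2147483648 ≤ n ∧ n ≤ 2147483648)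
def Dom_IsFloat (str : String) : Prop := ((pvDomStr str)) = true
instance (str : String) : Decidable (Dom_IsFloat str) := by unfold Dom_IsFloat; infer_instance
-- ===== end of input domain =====

-- B replaces A's split-then-check with one O(1)-space left-to-right scan (dot counter + current segment length); return values agree.
-- Both ports use PySem's isdigit for Python's .isnumeric(): exact on the ASCII Dom (they differ only on non-ASCII numeric characters).

-- ===== PORT A =====
def IsFloat (str : String) : Bool :=
  let s := PySem.Chars.splitOn str.toList ['.']
  if s.length > 2 then false
  else s.all (fun si => PySem.Chars.strIsdigit si)

-- ===== PORT B =====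
def scanIsFloat : List Char → Nat → Nat → Bool
  | [], dots, seg => decide (dots ≤ 1) && decide (0 < seg)
  | c :: rest, dots, seg =>
    if c = '.' then
      if seg = 0 then false else scanIsFloat rest (dots + 1) 0
    else if PySem.Chars.isdigit c then scanIsFloat rest dots (seg + 1)
    else false

def IsFloat_alt (str : String) : Bool := scanIsFloat str.toList 0 0

-- ===== PRECONDITION & SPEC =====
def Spec_IsFloat (str : String) (out : Bool) : Prop := out = IsFloat_alt str
instance (str : String) (out : Bool) : Decidable (Spec_IsFloat str out) := by unfold Spec_IsFloat; infer_instance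

-- ===== CLAIM (what is proved, stated in full; the proofs are below) =====
def Claim_equal_IsFloat : Prop := ∀ (str : String), Dom_IsFloat str → Spec_IsFloat str (IsFloat str)

-- ===== LEMMAS AND PROOFS =====

/-- Functional splitter on '.': first segment and the list of later segments. -/
def splitP : List Char → List Char × List (List Char)
  | [] => ([], [])
  | c :: cs =>
    let p := splitP cs
    if c = '.' then ([], p.1 :: p.2) else (c :: p.1, p.2)

theorem go_spec (cs : List Char) : ∀ (fuel : Nat) (cur : List Char) (acc : List (List Char)),
    cs.length ≤ fuel →
    PySem.Chars.splitOn.go ['.'] fuel cs cur acc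
      = acc.reverse ++ (cur.reverse ++ (splitP cs).1) :: (splitP cs).2 := by
  induction cs with
  | nil =>
    intro fuel cur acc _
    cases fuel <;> simp [PySem.Chars.splitOn.go, splitP]
  | cons c rest ih =>
    intro fuel cur acc hle
    cases fuel with
    | zero => simp at hle
    | succ f =>
      by_cases hc : c = '.'
      · subst hc
        rw [show PySem.Chars.splitOn.go ['.'] (f+1) ('.' :: rest) cur acc
              = PySem.Chars.splitOn.go ['.'] f rest [] (cur.reverse :: acc) by
            simp [PySem.Chars.splitOn.go, List.isPrefixOf]]
        rw [ih f [] (cur.reverse :: acc) (by simpa using hle)]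
        simp [splitP]
      · rw [show PySem.Chars.splitOn.go ['.'] (f+1) (c :: rest) cur acc
              = PySem.Chars.splitOn.go ['.'] f rest (c :: cur) acc by
            simp [PySem.Chars.splitOn.go, List.isPrefixOf, Ne.symm hc]]
        rw [ih f (c :: cur) acc (by simpa using Nat.lt_succ_iff.mp (by simpa using hle))]
        simp [splitP, hc]

theorem splitOn_eq_splitP (cs : List Char) :
    PySem.Chars.splitOn cs ['.'] = (splitP cs).1 :: (splitP cs).2 := by
  unfold PySem.Chars.splitOn
  rw [go_spec cs (cs.length + 1) [] [] (Nat.le_succ _)]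
  simp

theorem scan_spec (cs : List Char) : ∀ (dots seg : Nat),
    scanIsFloat cs dots seg
      = (decide (dots + (splitP cs).2.length + 1 ≤ 2)
          && (decide (0 < seg) || !(splitP cs).1.isEmpty)
          && (splitP cs).1.all PySem.Chars.isdigit
          && (splitP cs).2.all PySem.Chars.strIsdigit) := by
  induction cs with
  | nil => intro dots seg; simp [scanIsFloat, splitP]
  | cons c rest ih =>
    intro dots seg
    by_cases hc : c = '.'
    · subst hc
      by_cases hs : seg = 0
      · subst hs; simp [scanIsFloat, splitP]
      · rw [show scanIsFloat ('.' :: rest) dots seg = scanIsFloat rest (dots + 1) 0 by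
            simp [scanIsFloat, hs]]
        rw [ih (dots + 1) 0]
        simp [splitP, PySem.Chars.strIsdigit, Nat.pos_of_ne_zero hs, Nat.add_right_comm,
          Bool.and_assoc]
        rcases eq_or_ne (splitP rest).2 [] with hl | hl
        · by_cases hdo : dots = 0 <;> simp [hl, hdo]
        · have hp : 0 < (splitP rest).2.length := List.length_pos_of_ne_nil hl
          simp [hl, show ¬(dots + 1 + ((splitP rest).2.length + 1) ≤ 2) by omega]
    · by_cases hd : PySem.Chars.isdigit c
      · rw [show scanIsFloat (c :: rest) dots seg = scanIsFloat rest dots (seg + 1) by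
            simp [scanIsFloat, hc, hd]]
        rw [ih dots (seg + 1)]
        simp [splitP, hc, hd]
      · simp [scanIsFloat, hc, hd, splitP]

-- ===== VERDICT (by name: the statement is the Claim_ definition above) =====
theorem IsFloat_spec : Claim_equal_IsFloat := by
  intro str _
  unfold Spec_IsFloat IsFloat IsFloat_alt
  rw [splitOn_eq_splitP, scan_spec]
  simp [PySem.Chars.strIsdigit]
  have h : (!decide (2 ≤ (splitP str.toList).2.length))
      = decide ((splitP str.toList).2.length ≤ 1) := by
    by_cases h2 : 2 ≤ (splitP str.toList).2.length <;> simp [h2] <;> omega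
  rw [h]
  simp only [Bool.and_assoc]
  rfl
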